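-- pv_equiv track=rewrite | github.com/valerius/lidar-reader | program.py | trace_beginning_of_train
-- ===== SOURCE A (Python) =====
-- def trace_beginning_of_train(coordinates, timestamps):
--     result = []
--     for i, row in enumerate(coordinates):
--         # Front of the train
--         last_item = row[-1]
--         # If front of train has passed the y-axis, then stop
--         if last_item[0] <= 0:
--             return result
--         # The front of the train is a bit further from the lidar
--         elif last_item[1] > 3000:
--             result.append((timestamps[i], last_item))
--     return result
-- ===== SOURCE B (Python) =====
-- def trace_beginning_of_train(coordinates, timestamps):
--     # Two phases: first find the cut index (first row whose front has passed
--     # the y-axis), then filter-and-project over the truncated prefix.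
--     n = len(coordinates)
--     cut = next((i for i, row in enumerate(coordinates) if row[-1][0] <= 0), n)
--     return [(timestamps[i], row[-1])
--             for i, row in enumerate(coordinates[:cut]) if row[-1][1] > 3000]
-- ===== Notes on version B (the rewrite author's own statement) =====
-- stated objective: alternative
-- what changed: Replaces the single loop with early return and an appended accumulator by a two-phase decomposition: first compute the cut index where the front passes the y-axis, then filter-and-project the truncated prefix with a comprehension.
import Mathlib
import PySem

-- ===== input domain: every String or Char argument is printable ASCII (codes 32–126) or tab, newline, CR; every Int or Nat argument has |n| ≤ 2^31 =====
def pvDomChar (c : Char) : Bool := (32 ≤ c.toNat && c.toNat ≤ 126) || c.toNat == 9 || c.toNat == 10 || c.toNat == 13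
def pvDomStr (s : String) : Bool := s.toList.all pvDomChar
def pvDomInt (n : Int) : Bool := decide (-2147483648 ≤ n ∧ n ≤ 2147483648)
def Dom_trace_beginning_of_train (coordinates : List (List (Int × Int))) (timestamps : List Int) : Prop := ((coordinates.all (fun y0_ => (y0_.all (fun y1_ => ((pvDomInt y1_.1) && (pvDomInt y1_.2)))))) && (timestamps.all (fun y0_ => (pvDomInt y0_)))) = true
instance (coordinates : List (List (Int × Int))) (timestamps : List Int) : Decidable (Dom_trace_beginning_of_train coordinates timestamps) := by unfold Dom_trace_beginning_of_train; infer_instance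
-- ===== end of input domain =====

-- B replaces A's single loop with early return by a two-phase decomposition (find the cut
-- index, then filter-and-project the truncated prefix); alternative structure, same cost.


-- ===== PORT A =====
-- A's loop over enumerate(coordinates) with early return; row[-1] and timestamps[i]
-- ported with PySem.List.pyGet? (the .getD defaults are unreachable inside Pre_).
def tbGoA : List (List (Int × Int)) → List Int → Int → List (Int × (Int × Int)) → List (Int × (Int × Int))
  | [], _, _, result => result
  | row :: rest, ts, i, result =>
    let last_item := (PySem.List.pyGet? row (-1)).getD (0, 0)
    if last_item.1 ≤ 0 then result
    else if last_item.2 > 3000 then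
      tbGoA rest ts (i + 1) (result ++ [((PySem.List.pyGet? ts i).getD 0, last_item)])
    else tbGoA rest ts (i + 1) result

def trace_beginning_of_train (coordinates : List (List (Int × Int))) (timestamps : List Int) : List (Int × (Int × Int)) :=
  tbGoA coordinates timestamps 0 []

-- ===== PORT B =====
-- B phase 1: the cut index = first row whose front has x ≤ 0 (else len(coordinates)).
def tbCut : List (List (Int × Int)) → Nat
  | [] => 0
  | row :: rest =>
    if ((PySem.List.pyGet? row (-1)).getD (0, 0)).1 ≤ 0 then 0 else tbCut rest + 1

-- B phase 2: filter-and-project comprehension over enumerate(coordinates[:cut]).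
def trace_beginning_of_train_alt (coordinates : List (List (Int × Int))) (timestamps : List Int) : List (Int × (Int × Int)) :=
  (PySem.List.enumerate (coordinates.take (tbCut coordinates)) 0).filterMap fun p =>
    let l := (PySem.List.pyGet? p.2 (-1)).getD (0, 0)
    if l.2 > 3000 then some ((PySem.List.pyGet? timestamps p.1).getD 0, l) else none

-- ===== PRECONDITION & SPEC =====
def pvLastD (row : List (Int × Int)) : Int × Int := (PySem.List.pyGet? row (-1)).getD (0, 0)

-- Pre_ excludes exactly the inputs where Python A raises: scanning rows while the front
-- stays right of the y-axis, it meets an empty row (IndexError on row[-1]) or a qualifying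
-- row whose index is ≥ len(timestamps) (IndexError on timestamps[i]).
def Pre_trace_beginning_of_train (coordinates : List (List (Int × Int))) (timestamps : List Int) : Prop :=
  ∀ i < coordinates.length,
    (∀ j < i, coordinates.getD j [] ≠ [] ∧ (pvLastD (coordinates.getD j [])).1 > 0) →
    coordinates.getD i [] ≠ [] ∧
      ((pvLastD (coordinates.getD i [])).1 > 0 →
        (pvLastD (coordinates.getD i [])).2 > 3000 → i < timestamps.length)
instance (coordinates : List (List (Int × Int))) (timestamps : List Int) : Decidable (Pre_trace_beginning_of_train coordinates timestamps) := by unfold Pre_trace_beginning_of_train; infer_instance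

def pvWitness_trace_beginning_of_train : (List (List (Int × Int))) × List Int :=
  ([[(1, 4000)], [(2, 100)], [(-1, 4000)]], [5, 6])

def Spec_trace_beginning_of_train (coordinates : List (List (Int × Int))) (timestamps : List Int) (out : List (Int × (Int × Int))) : Prop := out = trace_beginning_of_train_alt coordinates timestamps
instance (coordinates : List (List (Int × Int))) (timestamps : List Int) (out : List (Int × (Int × Int))) : Decidable (Spec_trace_beginning_of_train coordinates timestamps out) := by unfold Spec_trace_beginning_of_train; infer_instance

-- ===== CLAIM (what is proved, stated in full; the proofs are below) =====
def Claim_equal_trace_beginning_of_train : Prop := ∀ (coordinates : List (List (Int × Int))) (timestamps : List Int), Dom_trace_beginning_of_train coordinates timestamps → Pre_trace_beginning_of_train coordinates timestamps → Spec_trace_beginning_of_train coordinates timestamps (trace_beginning_of_train coordinates timestamps)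

-- ===== LEMMAS AND PROOFS =====
theorem tbWitness_ok :
    Dom_trace_beginning_of_train pvWitness_trace_beginning_of_train.1 pvWitness_trace_beginning_of_train.2 ∧
    Pre_trace_beginning_of_train pvWitness_trace_beginning_of_train.1 pvWitness_trace_beginning_of_train.2 := by
  decide

-- The accumulator invariant: A's loop from index i equals res ++ B's computation on the
-- remaining rows enumerated from i.  Holds for ALL inputs (both ports total via .getD).
theorem tbGoA_eq (coords : List (List (Int × Int))) :
    ∀ (ts : List Int) (i : Int) (res : List (Int × (Int × Int))),
      tbGoA coords ts i res =
        res ++ ((PySem.List.enumerate (coords.take (tbCut coords)) i).filterMap fun p =>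
          let l := (PySem.List.pyGet? p.2 (-1)).getD (0, 0)
          if l.2 > 3000 then some ((PySem.List.pyGet? ts p.1).getD 0, l) else none) := by
  induction coords with
  | nil => intro ts i res; simp [tbGoA, tbCut]
  | cons row rest ih =>
    intro ts i res
    by_cases h0 : ((PySem.List.pyGet? row (-1)).getD (0, 0)).1 ≤ 0
    · simp [tbGoA, tbCut, h0]
    · by_cases h1 : ((PySem.List.pyGet? row (-1)).getD (0, 0)).2 > 3000
      · simp [tbGoA, tbCut, h0, h1, PySem.List.enumerate_cons, ih]
      · simp [tbGoA, tbCut, h0, h1, PySem.List.enumerate_cons, ih]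

-- ===== VERDICT (by name: the statement is the Claim_ definition above) =====
theorem trace_beginning_of_train_spec : Claim_equal_trace_beginning_of_train := by
  intro coordinates timestamps _ _
  unfold Spec_trace_beginning_of_train trace_beginning_of_train trace_beginning_of_train_alt
  simpa using tbGoA_eq coordinates timestamps 0 []
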